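-- pv_equiv track=rewrite | github.com/viveksahu92/GSoc-third-organization-problem | SUBMIT_ON_WEBSITE_FINAL.py | bfs_region
-- ===== SOURCE A (Python) =====
-- from collections import deque
--
-- def is_open_to_outside(cell_walls, r, c, rows, cols):
--     if r == 0 and (cell_walls & 1) == 0:
--         return True
--     if c == cols - 1 and (cell_walls & 2) == 0:
--         return True
--     if r == rows - 1 and (cell_walls & 4) == 0:
--         return True
--     if c == 0 and (cell_walls & 8) == 0:
--         return True
--     return False
--
-- def bfs_region(grid, visited, sr, sc, rows, cols):
--     q = deque([(sr, sc)])
--     visited[sr][sc] = True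
--     touches_outside = is_open_to_outside(grid[sr][sc], sr, sc, rows, cols)
--
--     while q:
--         r, c = q.popleft()
--         w = grid[r][c]
--
--         # Up
--         if r > 0 and not visited[r - 1][c]:
--             if (w & 1) == 0 and (grid[r - 1][c] & 4) == 0:
--                 visited[r - 1][c] = True
--                 q.append((r - 1, c))
--                 if is_open_to_outside(grid[r - 1][c], r - 1, c, rows, cols):
--                     touches_outside = True
--
--         # Right
--         if c < cols - 1 and not visited[r][c + 1]:
--             if (w & 2) == 0 and (grid[r][c + 1] & 8) == 0:
--                 visited[r][c + 1] = True
--                 q.append((r, c + 1))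
--                 if is_open_to_outside(grid[r][c + 1], r, c + 1, rows, cols):
--                     touches_outside = True
--
--         # Down
--         if r < rows - 1 and not visited[r + 1][c]:
--             if (w & 4) == 0 and (grid[r + 1][c] & 1) == 0:
--                 visited[r + 1][c] = True
--                 q.append((r + 1, c))
--                 if is_open_to_outside(grid[r + 1][c], r + 1, c, rows, cols):
--                     touches_outside = True
--
--         # Left
--         if c > 0 and not visited[r][c - 1]:
--             if (w & 8) == 0 and (grid[r][c - 1] & 2) == 0:
--                 visited[r][c - 1] = True
--                 q.append((r, c - 1))
--                 if is_open_to_outside(grid[r][c - 1], r, c - 1, rows, cols):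
--                     touches_outside = True
--
--     return touches_outside
-- ===== SOURCE B (Python) =====
-- def is_open_to_outside(cell_walls, r, c, rows, cols):
--     if r == 0 and (cell_walls & 1) == 0:
--         return True
--     if c == cols - 1 and (cell_walls & 2) == 0:
--         return True
--     if r == rows - 1 and (cell_walls & 4) == 0:
--         return True
--     if c == 0 and (cell_walls & 8) == 0:
--         return True
--     return False
--
-- def bfs_region(grid, visited, sr, sc, rows, cols):
--     # Round-based fixpoint (no queue): repeatedly sweep the whole region found so
--     # far, collecting in `new` every unvisited cell reachable through an open wall
--     # pair, and append the whole layer at once; stop when a sweep adds nothing.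
--     # The border test is a single any() pass over the finished region, and the
--     # region cells are written back to `visited` in one final pass.
--     visited[sr][sc] = True
--     region = [(sr, sc)]
--     while True:
--         new = []
--         for r, c in region:
--             w = grid[r][c]
--             for ok, nr, nc, wb, nb in ((r > 0, r - 1, c, 1, 4),
--                                        (c < cols - 1, r, c + 1, 2, 8),
--                                        (r < rows - 1, r + 1, c, 4, 1),
--                                        (c > 0, r, c - 1, 8, 2)):
--                 if ok and not visited[nr][nc] and (nr, nc) not in region \
--                         and (nr, nc) not in new \
--                         and (w & wb) == 0 and (grid[nr][nc] & nb) == 0: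
--                     new.append((nr, nc))
--         if not new:
--             break
--         region += new
--     for r, c in region:
--         visited[r][c] = True
--     return any(is_open_to_outside(grid[r][c], r, c, rows, cols) for r, c in region)
-- ===== Notes on version B (the rewrite author's own statement) =====
-- stated objective: alternative
-- what changed: The queue-driven BFS is replaced by a round-based fixpoint: each round sweeps the whole region found so far and appends the entire layer of newly reachable cells at once, stopping when a sweep adds nothing; the border test is a single any() pass over the finished region and visited is written back in one final pass.
-- outside the precondition, e.g. on bfs_region([[0], [10], [11]], [[False], [False], [True]], 1, -1, 3, 4): A returns True, B raises IndexError; on bfs_region([[12, 4, 2]], [[True, False, False]], -1, 0, 1, 3): A returns False, B returns True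
import Mathlib
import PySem

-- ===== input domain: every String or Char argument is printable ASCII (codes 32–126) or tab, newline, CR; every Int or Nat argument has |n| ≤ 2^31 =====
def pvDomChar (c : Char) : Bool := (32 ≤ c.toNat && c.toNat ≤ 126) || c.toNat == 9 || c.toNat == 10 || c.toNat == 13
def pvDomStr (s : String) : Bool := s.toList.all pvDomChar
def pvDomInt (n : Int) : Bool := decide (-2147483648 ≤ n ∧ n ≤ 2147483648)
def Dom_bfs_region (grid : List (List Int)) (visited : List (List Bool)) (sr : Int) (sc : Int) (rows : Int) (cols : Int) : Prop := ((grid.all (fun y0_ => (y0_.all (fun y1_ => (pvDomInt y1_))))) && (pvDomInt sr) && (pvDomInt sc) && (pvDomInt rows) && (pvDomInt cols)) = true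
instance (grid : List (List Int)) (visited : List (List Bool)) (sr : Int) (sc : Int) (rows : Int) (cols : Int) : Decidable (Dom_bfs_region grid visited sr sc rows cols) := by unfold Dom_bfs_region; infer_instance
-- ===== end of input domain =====

-- B replaces A's queue-driven BFS by a round-based fixpoint: each round sweeps the whole
-- region found so far, collects the entire layer of newly reachable cells, appends it at
-- once and stops when a sweep adds nothing; the border test is one any() pass over the
-- finished region. Both Pythons leave `visited` in the same final state (A marks cells as
-- it discovers them, B writes the region back in one final pass); the theorems here are
-- about the return value. Indexing is exact on Pre_ (nonnegative in-range coordinates, or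
-- a fill blocked at the start cell); Python's negative-index wraparound lies outside Pre_.

-- ===== PORT A =====
-- grid/visited accessors with a default, only read in-range under Pre_
def g2 (g : List (List Int)) (r c : Int) : Int :=
  PySem.List.pyGetD (PySem.List.pyGetD g r []) c 0
def v2 (v : List (List Bool)) (r c : Int) : Bool :=
  PySem.List.pyGetD (PySem.List.pyGetD v r []) c true
def vmark (v : List (List Bool)) (r c : Int) : List (List Bool) :=
  PySem.List.pySetD v r (PySem.List.pySetD (PySem.List.pyGetD v r []) c true)

def is_open_to_outside (w r c rows cols : Int) : Bool :=
  if r == 0 && PySem.Int.band w 1 == 0 then true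
  else if c == cols - 1 && PySem.Int.band w 2 == 0 then true
  else if r == rows - 1 && PySem.Int.band w 4 == 0 then true
  else if c == 0 && PySem.Int.band w 8 == 0 then true
  else false

-- fuel bound used by both loop ports: an upper bound on the number of distinct cells the
-- fill can reach (all lie in [0, max sr (rows-1)] × [0, max sc (cols-1)] on Pre_ inputs)
def capN (sr sc rows cols : Int) : Nat :=
  (max sr (rows - 1) + 1).toNat * (max sc (cols - 1) + 1).toNat

-- one neighbour block of A's loop body (guard, mark, enqueue, inline boundary flag)
def tryA (grid : List (List Int)) (rows cols : Int) (ok : Bool) (w wb nb nr nc : Int)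
    (st : List (List Bool) × List (Int × Int) × Bool) :
    List (List Bool) × List (Int × Int) × Bool :=
  if ok && !(v2 st.1 nr nc) then
    if PySem.Int.band w wb == 0 && PySem.Int.band (g2 grid nr nc) nb == 0 then
      (vmark st.1 nr nc, st.2.1 ++ [(nr, nc)],
       st.2.2 || is_open_to_outside (g2 grid nr nc) nr nc rows cols)
    else st
  else st

-- A's `while q:` loop; the fuel (capN + 2) strictly bounds the number of iterations on
-- Pre_ inputs (each enqueue adds a distinct cell of the reachable rectangle)
def bfsA_loop (grid : List (List Int)) (rows cols : Int) :
    Nat → List (Int × Int) → List (List Bool) → Bool → Bool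
  | 0, _, _, t => t
  | _ + 1, [], _, t => t
  | fuel + 1, (r, c) :: rest, visited, t =>
    let w := g2 grid r c
    let s1 := tryA grid rows cols (decide (r > 0)) w 1 4 (r - 1) c (visited, rest, t)
    let s2 := tryA grid rows cols (decide (c < cols - 1)) w 2 8 r (c + 1) s1
    let s3 := tryA grid rows cols (decide (r < rows - 1)) w 4 1 (r + 1) c s2
    let s4 := tryA grid rows cols (decide (c > 0)) w 8 2 r (c - 1) s3
    bfsA_loop grid rows cols fuel s4.2.1 s4.1 s4.2.2

def bfs_region (grid : List (List Int)) (visited : List (List Bool)) (sr : Int) (sc : Int) (rows : Int) (cols : Int) : Bool :=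
  let visited1 := vmark visited sr sc
  let t0 := is_open_to_outside (g2 grid sr sc) sr sc rows cols
  bfsA_loop grid rows cols (capN sr sc rows cols + 2) [(sr, sc)] visited1 t0

-- ===== PORT B =====
-- the direction tuple list B iterates per cell
def dirTable (rows cols r c : Int) : List (Bool × Int × Int × Int × Int) :=
  [(decide (r > 0), r - 1, c, 1, 4),
   (decide (c < cols - 1), r, c + 1, 2, 8),
   (decide (r < rows - 1), r + 1, c, 4, 1),
   (decide (c > 0), r, c - 1, 8, 2)]

-- B's per-direction body: collect an unvisited, not-yet-seen neighbour into `new`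
def tryN (grid : List (List Int)) (v1 : List (List Bool)) (region : List (Int × Int))
    (w : Int) (new : List (Int × Int)) (d : Bool × Int × Int × Int × Int) :
    List (Int × Int) :=
  match d with
  | (ok, nr, nc, wb, nb) =>
    if ok && !(v2 v1 nr nc) && !(region.contains (nr, nc)) && !(new.contains (nr, nc))
        && PySem.Int.band w wb == 0 && PySem.Int.band (g2 grid nr nc) nb == 0 then
      new ++ [(nr, nc)]
    else new

-- one round: sweep the whole region, collecting the next layer
def sweepB (grid : List (List Int)) (v1 : List (List Bool)) (rows cols : Int)
    (region : List (Int × Int)) : List (Int × Int) :=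
  region.foldl
    (fun new p => (dirTable rows cols p.1 p.2).foldl (tryN grid v1 region (g2 grid p.1 p.2)) new)
    []

-- B's `while True:` loop: append each layer wholesale until a sweep adds nothing
def bfsB_loop (grid : List (List Int)) (v1 : List (List Bool)) (rows cols : Int) :
    Nat → List (Int × Int) → List (Int × Int)
  | 0, region => region
  | fuel + 1, region =>
    let new := sweepB grid v1 rows cols region
    if new.isEmpty then region
    else bfsB_loop grid v1 rows cols fuel (region ++ new)

def regionCheck (grid : List (List Int)) (rows cols : Int) (p : Int × Int) : Bool :=
  is_open_to_outside (g2 grid p.1 p.2) p.1 p.2 rows cols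

def bfs_region_alt (grid : List (List Int)) (visited : List (List Bool)) (sr : Int) (sc : Int) (rows : Int) (cols : Int) : Bool :=
  let v1 := vmark visited sr sc
  (bfsB_loop grid v1 rows cols (capN sr sc rows cols + 2) [(sr, sc)]).any
    (regionCheck grid rows cols)

-- ===== PRECONDITION & SPEC =====
-- Python index validity (wraparound included), as a Bool
def idxB (n : Nat) (i : Int) : Bool := decide (-(n : Int) ≤ i ∧ i < (n : Int))

-- the whole rectangle of coordinates the fill could ever reach is indexable with
-- nonnegative indices, in both grid and visited
def preRect (grid : List (List Int)) (visited : List (List Bool)) (sr : Int) (sc : Int) (rows : Int) (cols : Int) : Bool :=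
  decide (0 ≤ sr ∧ 0 ≤ sc ∧
    max sr (rows - 1) < (grid.length : Int) ∧ max sr (rows - 1) < (visited.length : Int) ∧
    ∀ r < grid.length, ((r : Int) ≤ max sr (rows - 1) →
      max sc (cols - 1) < ((grid.getD r []).length : Int) ∧
      max sc (cols - 1) < ((visited.getD r []).length : Int)))

-- one first move of A is blocked without an out-of-range read, in A's evaluation order
def blockedB (grid : List (List Int)) (v1 : List (List Bool)) (ok : Bool)
    (w nr nc wb nb : Int) : Bool :=
  !ok ||
    (idxB v1.length nr && idxB (PySem.List.pyGetD v1 nr []).length nc &&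
      (v2 v1 nr nc || PySem.Int.band w wb != 0 ||
        (idxB grid.length nr && idxB (PySem.List.pyGetD grid nr []).length nc &&
          PySem.Int.band (g2 grid nr nc) nb != 0)))

-- or: the start cell is indexable and all four first moves are blocked, so the fill
-- stops at the start cell
def preStuck (grid : List (List Int)) (visited : List (List Bool)) (sr : Int) (sc : Int) (rows : Int) (cols : Int) : Bool :=
  idxB grid.length sr && idxB (PySem.List.pyGetD grid sr []).length sc &&
  idxB visited.length sr && idxB (PySem.List.pyGetD visited sr []).length sc &&
  (let v1 := vmark visited sr sc
   let w := g2 grid sr sc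
   blockedB grid v1 (decide (sr > 0)) w (sr - 1) sc 1 4 &&
   blockedB grid v1 (decide (sc < cols - 1)) w sr (sc + 1) 2 8 &&
   blockedB grid v1 (decide (sr < rows - 1)) w (sr + 1) sc 4 1 &&
   blockedB grid v1 (decide (sc > 0)) w sr (sc - 1) 8 2)

-- Pre_ = no IndexError and no index aliasing: either the whole reachable rectangle is
-- indexable with canonical (nonnegative) indices, or the fill is blocked at the start.
-- It excludes inputs on which A returns only because negative-index wraparound happens
-- to stop the fill — an artefact of Python indexing (see claim cites).
def Pre_bfs_region (grid : List (List Int)) (visited : List (List Bool)) (sr : Int) (sc : Int) (rows : Int) (cols : Int) : Prop :=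
  (preRect grid visited sr sc rows cols || preStuck grid visited sr sc rows cols) = true
instance (grid : List (List Int)) (visited : List (List Bool)) (sr : Int) (sc : Int) (rows : Int) (cols : Int) : Decidable (Pre_bfs_region grid visited sr sc rows cols) := by unfold Pre_bfs_region; infer_instance

def pvWitness_bfs_region : List (List Int) × List (List Bool) × Int × Int × Int × Int :=
  ([[0, 15], [15, 15]], [[false, false], [false, false]], 0, 0, 2, 2)

def Spec_bfs_region (grid : List (List Int)) (visited : List (List Bool)) (sr : Int) (sc : Int) (rows : Int) (cols : Int) (out : Bool) : Prop := out = bfs_region_alt grid visited sr sc rows cols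
instance (grid : List (List Int)) (visited : List (List Bool)) (sr : Int) (sc : Int) (rows : Int) (cols : Int) (out : Bool) : Decidable (Spec_bfs_region grid visited sr sc rows cols out) := by unfold Spec_bfs_region; infer_instance

-- ===== CLAIM (what is proved, stated in full; the proofs are below) =====
def Claim_equal_bfs_region : Prop := ∀ (grid : List (List Int)) (visited : List (List Bool)) (sr : Int) (sc : Int) (rows : Int) (cols : Int), Dom_bfs_region grid visited sr sc rows cols → Pre_bfs_region grid visited sr sc rows cols → Spec_bfs_region grid visited sr sc rows cols (bfs_region grid visited sr sc rows cols)

-- ===== LEMMAS AND PROOFS =====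

-- the rectangle every reachable cell lies in
def InRect (sr sc rows cols : Int) (p : Int × Int) : Prop :=
  0 ≤ p.1 ∧ p.1 ≤ max sr (rows - 1) ∧ 0 ≤ p.2 ∧ p.2 ≤ max sc (cols - 1)

-- canonical indexability of a cell in a Bool matrix
def cellOK (v : List (List Bool)) (p : Int × Int) : Prop :=
  0 ≤ p.1 ∧ p.1 < (v.length : Int) ∧ 0 ≤ p.2 ∧ p.2 < ((PySem.List.pyGetD v p.1 []).length : Int)

-- the wall-open/unvisited part of one direction tuple
def EdgeD (grid : List (List Int)) (v1 : List (List Bool)) (w : Int)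
    (d : Bool × Int × Int × Int × Int) : Prop :=
  d.1 = true ∧ v2 v1 d.2.1 d.2.2.1 = false ∧
  PySem.Int.band w d.2.2.2.1 = 0 ∧ PySem.Int.band (g2 grid d.2.1 d.2.2.1) d.2.2.2.2 = 0

-- the step relation both programs explore
def E (grid : List (List Int)) (v1 : List (List Bool)) (rows cols : Int) (p q : Int × Int) : Prop :=
  ∃ d ∈ dirTable rows cols p.1 p.2, q = (d.2.1, d.2.2.1) ∧ EdgeD grid v1 (g2 grid p.1 p.2) d

def Reach (grid : List (List Int)) (v1 : List (List Bool)) (rows cols sr sc : Int) : (Int × Int) → Prop :=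
  Relation.ReflTransGen (E grid v1 rows cols) (sr, sc)

theorem dir_inRect {sr sc rows cols : Int} {p : Int × Int} {d : Bool × Int × Int × Int × Int}
    (hd : d ∈ dirTable rows cols p.1 p.2) (hp : InRect sr sc rows cols p) (hok : d.1 = true) :
    InRect sr sc rows cols (d.2.1, d.2.2.1) := by
  obtain ⟨h1, h2, h3, h4⟩ := hp
  simp only [dirTable, List.mem_cons] at hd
  rcases hd with h | h | h | h | h <;> first
    | (subst h; simp only [decide_eq_true_eq] at hok; refine ⟨?_, ?_, ?_, ?_⟩ <;> simp <;> omega)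
    | exact absurd h (by simp)

theorem e_inRect {grid v1 rows cols sr sc} {p q : Int × Int}
    (h : E grid v1 rows cols p q) (hp : InRect sr sc rows cols p) :
    InRect sr sc rows cols q := by
  obtain ⟨d, hd, rfl, he⟩ := h
  exact dir_inRect hd hp he.1

theorem reach_subset {grid v1 rows cols sr sc} (S : List (Int × Int))
    (hs : (sr, sc) ∈ S)
    (hc : ∀ p ∈ S, ∀ x, E grid v1 rows cols p x → x ∈ S) :
    ∀ x, Reach grid v1 rows cols sr sc x → x ∈ S := by
  intro x hx
  induction hx with
  | refl => exact hs
  | tail _ he ih => exact hc _ ih _ he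

-- counting: a nodup list of rectangle cells has at most capN elements
theorem card_le_cap {sr sc rows cols : Int} (S : List (Int × Int)) (hnd : S.Nodup)
    (hin : ∀ p ∈ S, InRect sr sc rows cols p) : S.length ≤ capN sr sc rows cols := by
  have h1 : S.length = S.toFinset.card := (List.toFinset_card_of_nodup hnd).symm
  have h2 : S.toFinset ⊆
      (Finset.Icc (0:Int) (max sr (rows-1))) ×ˢ (Finset.Icc (0:Int) (max sc (cols-1))) := by
    intro p hp
    rw [List.mem_toFinset] at hp
    obtain ⟨a, b, c, d⟩ := hin p hp
    simp only [Finset.mem_product, Finset.mem_Icc]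
    exact ⟨⟨a, b⟩, ⟨c, d⟩⟩
  calc S.length = S.toFinset.card := h1
    _ ≤ _ := Finset.card_le_card h2
    _ = capN sr sc rows cols := by
        rw [Finset.card_product, Int.card_Icc, Int.card_Icc]
        simp [capN]

-- shape lemmas for vmark
theorem vmark_length (v : List (List Bool)) (r c : Int) : (vmark v r c).length = v.length := by
  simp [vmark, PySem.List.length_pySetD]

theorem vmark_rowlen (v : List (List Bool)) (r c i : Int) (hr : 0 ≤ r) (hi : 0 ≤ i) :
    ((PySem.List.pyGetD (vmark v r c) i []).length) = (PySem.List.pyGetD v i []).length := by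
  unfold vmark
  rw [PySem.List.pySetD_of_nonneg _ _ hr]
  by_cases hin : i < (v.length : Int)
  · rw [PySem.List.pyGetD_eq_getElem _ _ hi (by simpa using hin), List.getElem_set]
    by_cases h : r.toNat = i.toNat
    · have hir : i = r := by omega
      subst hir
      rw [if_pos h, PySem.List.length_pySetD]
    · rw [if_neg h, ← PySem.List.pyGetD_eq_getElem _ _ hi (by simpa using hin)]
  · have hnone : ∀ (xs : List (List Bool)), xs.length = v.length →
        PySem.List.pyGetD xs i [] = [] := by
      intro xs hxs
      apply PySem.List.pyGetD_of_none
      simp [PySem.List.pyGet?_eq_none_iff, PySem.Raise.InRange, hxs]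
      omega
    rw [hnone _ (by simp), hnone _ rfl]

theorem v2_vmark (v : List (List Bool)) (r c r' c' : Int)
    (h1 : cellOK v (r, c)) (h2 : cellOK v (r', c')) :
    v2 (vmark v r c) r' c' = if r' = r ∧ c' = c then true else v2 v r' c' := by
  simp only [cellOK] at h1 h2
  obtain ⟨hr0, hrl, hc0, hcl⟩ := h1
  obtain ⟨hr0', hrl', hc0', hcl'⟩ := h2
  unfold vmark v2
  rw [PySem.List.pySetD_of_nonneg _ _ hr0]
  rw [PySem.List.pyGetD_eq_getElem _ _ hr0' (by simpa using hrl'), List.getElem_set]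
  by_cases hrr : r.toNat = r'.toNat
  · have hre : r' = r := by omega
    subst hre
    rw [if_pos hrr, PySem.List.pySetD_of_nonneg _ _ hc0]
    rw [PySem.List.pyGetD_eq_getElem _ _ hc0' (by simpa using hcl'), List.getElem_set]
    by_cases hcc : c.toNat = c'.toNat
    · have hce : c' = c := by omega
      subst hce
      rw [if_pos hcc, if_pos ⟨rfl, rfl⟩]
    · have hce : ¬ (c' = c) := by omega
      rw [if_neg hcc, if_neg (by tauto)]
      rw [PySem.List.pyGetD_eq_getElem _ _ hc0' (by simpa using hcl')]
  · have hre : ¬ (r' = r) := by omega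
    rw [if_neg hrr, if_neg (by tauto)]
    rw [PySem.List.pyGetD_eq_getElem _ _ hr0' (by simpa using hrl')]

-- transfer of cellOK along equal shapes
theorem cellOK_transfer {v w : List (List Bool)} (hlen : w.length = v.length)
    (hrow : ∀ i : Int, 0 ≤ i → i < (v.length : Int) →
      (PySem.List.pyGetD w i []).length = (PySem.List.pyGetD v i []).length)
    {p : Int × Int} (h : cellOK v p) : cellOK w p := by
  obtain ⟨a, b, c, d⟩ := h
  exact ⟨a, by rw [hlen]; exact b, c, by rw [hrow p.1 a b]; exact d⟩

-- A-side state invariant over the discovered list D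
def InvA (grid : List (List Int)) (v1 : List (List Bool)) (sr sc rows cols : Int)
    (D : List (Int × Int)) (vst : List (List Bool)) : Prop :=
  (∀ p : Int × Int, cellOK v1 p → v2 vst p.1 p.2 = (v2 v1 p.1 p.2 || decide (p ∈ D))) ∧
  vst.length = v1.length ∧
  (∀ i : Int, 0 ≤ i → i < (v1.length : Int) →
    (PySem.List.pyGetD vst i []).length = (PySem.List.pyGetD v1 i []).length) ∧
  D.Nodup ∧
  (∀ p ∈ D, InRect sr sc rows cols p ∧ Reach grid v1 rows cols sr sc p)

-- one tryA call, under the invariant: it either adds exactly the direction's target or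
-- leaves the state unchanged, and in either case all facts are preserved
theorem tryA_invar (grid : List (List Int)) (v1 : List (List Bool)) (sr sc rows cols : Int)
    (hrOK : ∀ p, InRect sr sc rows cols p → cellOK v1 p)
    (p : Int × Int) (d : Bool × Int × Int × Int × Int)
    (hd : d ∈ dirTable rows cols p.1 p.2) (hp : InRect sr sc rows cols p)
    (hreach : Reach grid v1 rows cols sr sc p)
    (D : List (Int × Int)) (vst : List (List Bool)) (ql : List (Int × Int)) (t : Bool)
    (hinv : InvA grid v1 sr sc rows cols D vst) :
    ∃ δ vst',
      tryA grid rows cols d.1 (g2 grid p.1 p.2) d.2.2.2.1 d.2.2.2.2 d.2.1 d.2.2.1 (vst, ql, t)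
        = (vst', ql ++ δ, t || δ.any (regionCheck grid rows cols)) ∧
      InvA grid v1 sr sc rows cols (D ++ δ) vst' ∧
      ((δ = [] ∧ (EdgeD grid v1 (g2 grid p.1 p.2) d → (d.2.1, d.2.2.1) ∈ D)) ∨
       (δ = [(d.2.1, d.2.2.1)] ∧ EdgeD grid v1 (g2 grid p.1 p.2) d ∧ (d.2.1, d.2.2.1) ∉ D)) := by
  obtain ⟨hvis, hlen, hrow, hnd, hmem⟩ := hinv
  obtain ⟨ok, nr, nc, wb, nb⟩ := d
  dsimp only at hd ⊢
  by_cases hok : ok = true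
  case neg =>
    refine ⟨[], vst, ?_, ?_, Or.inl ⟨rfl, ?_⟩⟩
    · unfold tryA
      have hc : (ok && !(v2 vst nr nc)) ≠ true := by simp [hok]
      rw [if_neg hc]
      simp
    · rw [List.append_nil]
      exact ⟨hvis, hlen, hrow, hnd, hmem⟩
    · intro he
      exact absurd he.1 hok
  case pos =>
    have hInR : InRect sr sc rows cols (nr, nc) :=
      dir_inRect hd hp (by simpa using hok)
    have hcell1 : cellOK v1 (nr, nc) := hrOK _ hInR
    have hv := hvis (nr, nc) hcell1
    by_cases hv1 : v2 v1 nr nc = true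
    · refine ⟨[], vst, ?_, ?_, Or.inl ⟨rfl, ?_⟩⟩
      · unfold tryA
        have hc : (ok && !(v2 vst nr nc)) ≠ true := by simp [hv, hv1]
        rw [if_neg hc]
        simp
      · rw [List.append_nil]
        exact ⟨hvis, hlen, hrow, hnd, hmem⟩
      · intro he
        exact absurd he.2.1 (by simp [hv1])
    · by_cases hD : (nr, nc) ∈ D
      · refine ⟨[], vst, ?_, ?_, Or.inl ⟨rfl, fun _ => hD⟩⟩
        · unfold tryA
          have hvt : v2 vst nr nc = true := by rw [hv]; simp [hD]
          have hc : (ok && !(v2 vst nr nc)) ≠ true := by simp [hvt]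
          rw [if_neg hc]
          simp
        · rw [List.append_nil]
          exact ⟨hvis, hlen, hrow, hnd, hmem⟩
      · have hvx : v2 v1 nr nc = false := by simpa using hv1
        have hvf : v2 vst nr nc = false := by
          rw [hv, hvx]
          simp [hD]
        by_cases hbands : PySem.Int.band (g2 grid p.1 p.2) wb = 0 ∧
            PySem.Int.band (g2 grid nr nc) nb = 0
        · have hE : EdgeD grid v1 (g2 grid p.1 p.2) (ok, nr, nc, wb, nb) :=
            ⟨by simpa using hok, hvx, hbands.1, hbands.2⟩
          refine ⟨[(nr, nc)], vmark vst nr nc, ?_, ?_, Or.inr ⟨rfl, hE, hD⟩⟩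
          · unfold tryA
            have hc : (ok && !(v2 vst nr nc)) = true := by simp [hok, hvf]
            rw [if_pos hc]
            have hc2 : (PySem.Int.band (g2 grid p.1 p.2) wb == 0 &&
                PySem.Int.band (g2 grid nr nc) nb == 0) = true := by
              simp [hbands.1, hbands.2]
            rw [if_pos hc2]
            simp [regionCheck]
          · refine ⟨?_, ?_, ?_, ?_, ?_⟩
            · intro p' hc'
              have hcvst : cellOK vst p' := cellOK_transfer hlen hrow hc'
              have hcvstx : cellOK vst (nr, nc) := cellOK_transfer hlen hrow hcell1
              rw [v2_vmark vst nr nc p'.1 p'.2 hcvstx hcvst]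
              by_cases hpx : p'.1 = nr ∧ p'.2 = nc
              · have hpe : p' = (nr, nc) := Prod.ext hpx.1 hpx.2
                rw [if_pos hpx]
                simp [hpe]
              · rw [if_neg hpx]
                rw [hvis p' hc']
                have hne : p' ≠ (nr, nc) := by
                  intro hh
                  exact hpx ⟨congrArg Prod.fst hh, congrArg Prod.snd hh⟩
                simp [List.mem_append, hne]
            · rw [vmark_length]
              exact hlen
            · intro i hi0 hiv
              rw [vmark_rowlen vst nr nc i hInR.1 hi0]
              exact hrow i hi0 hiv
            · rw [List.nodup_append]
              refine ⟨hnd, by simp, ?_⟩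
              intro a ha b hb heq
              have hb' : b = (nr, nc) := by simpa using hb
              subst hb'
              subst heq
              exact hD ha
            · intro p' hp'
              rcases List.mem_append.mp hp' with h | h
              · exact hmem p' h
              · have hpe : p' = (nr, nc) := by simpa using h
                subst hpe
                refine ⟨hInR, hreach.tail ?_⟩
                simp only [E]
                exact ⟨(ok, nr, nc, wb, nb), hd, rfl, hE⟩
        · refine ⟨[], vst, ?_, ?_, Or.inl ⟨rfl, ?_⟩⟩
          · unfold tryA
            have hc : (ok && !(v2 vst nr nc)) = true := by simp [hok, hvf]
            rw [if_pos hc]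
            have hc2 : ¬(PySem.Int.band (g2 grid p.1 p.2) wb == 0 &&
                PySem.Int.band (g2 grid nr nc) nb == 0) = true := by
              intro hcc
              simp only [Bool.and_eq_true, beq_iff_eq] at hcc
              exact hbands hcc
            rw [if_neg hc2]
            simp
          · rw [List.append_nil]
            exact ⟨hvis, hlen, hrow, hnd, hmem⟩
          · intro he
            exact absurd ⟨he.2.2.1, he.2.2.2⟩ hbands

-- A's loop computes "some reachable cell is open to the outside"
set_option maxHeartbeats 2000000 in
theorem A_char (grid : List (List Int)) (v1 : List (List Bool)) (sr sc rows cols : Int)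
    (hrOK : ∀ p, InRect sr sc rows cols p → cellOK v1 p) :
    ∀ (fuel : Nat) (P q : List (Int × Int)) (vst : List (List Bool)) (t : Bool),
    InvA grid v1 sr sc rows cols (P ++ q) vst →
    (∀ p ∈ P, ∀ x, E grid v1 rows cols p x → x ∈ P ++ q) →
    (sr, sc) ∈ P ++ q →
    t = (P ++ q).any (regionCheck grid rows cols) →
    q.length + (capN sr sc rows cols - (P ++ q).length) + 1 ≤ fuel →
    (bfsA_loop grid rows cols fuel q vst t = true ↔
      ∃ x, Reach grid v1 rows cols sr sc x ∧ regionCheck grid rows cols x = true) := by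
  intro fuel
  induction fuel with
  | zero =>
    intro P q vst t hinv hcl hstart ht hfuel
    omega
  | succ fuel ih =>
    intro P q vst t hinv hcl hstart ht hfuel
    cases q with
    | nil =>
      simp only [bfsA_loop]
      subst ht
      constructor
      · intro h
        obtain ⟨x, hx, hc⟩ := List.any_eq_true.mp h
        exact ⟨x, (hinv.2.2.2.2 x hx).2, hc⟩
      · rintro ⟨x, hr, hc⟩
        apply List.any_eq_true.mpr
        refine ⟨x, ?_, hc⟩
        refine reach_subset _ hstart ?_ x hr
        intro p hp y hy
        exact hcl p (by simpa using hp) y hy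
    | cons p0 tl =>
      obtain ⟨r, c⟩ := p0
      have hpD : (r, c) ∈ P ++ (r, c) :: tl := by simp
      have hpin := hinv.2.2.2.2 _ hpD
      have hd1 : ((decide (r > 0)), r - 1, c, (1:Int), (4:Int)) ∈ dirTable rows cols r c := by
        simp [dirTable]
      have hd2 : ((decide (c < cols - 1)), r, c + 1, (2:Int), (8:Int)) ∈ dirTable rows cols r c := by
        simp [dirTable]
      have hd3 : ((decide (r < rows - 1)), r + 1, c, (4:Int), (1:Int)) ∈ dirTable rows cols r c := by
        simp [dirTable]
      have hd4 : ((decide (c > 0)), r, c - 1, (8:Int), (2:Int)) ∈ dirTable rows cols r c := by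
        simp [dirTable]
      obtain ⟨d1, w1, he1, hinv1, hc1⟩ := tryA_invar grid v1 sr sc rows cols hrOK (r, c) _
        hd1 hpin.1 hpin.2 (P ++ (r, c) :: tl) vst tl t hinv
      obtain ⟨d2, w2, he2, hinv2, hc2⟩ := tryA_invar grid v1 sr sc rows cols hrOK (r, c) _
        hd2 hpin.1 hpin.2 _ w1 (tl ++ d1) (t || d1.any (regionCheck grid rows cols)) hinv1
      obtain ⟨d3, w3, he3, hinv3, hc3⟩ := tryA_invar grid v1 sr sc rows cols hrOK (r, c) _
        hd3 hpin.1 hpin.2 _ w2 ((tl ++ d1) ++ d2)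
        ((t || d1.any (regionCheck grid rows cols)) || d2.any (regionCheck grid rows cols)) hinv2
      obtain ⟨d4, w4, he4, hinv4, hc4⟩ := tryA_invar grid v1 sr sc rows cols hrOK (r, c) _
        hd4 hpin.1 hpin.2 _ w3 (((tl ++ d1) ++ d2) ++ d3)
        (((t || d1.any (regionCheck grid rows cols)) || d2.any (regionCheck grid rows cols))
          || d3.any (regionCheck grid rows cols)) hinv3
      dsimp only at he1 he2 he3 he4
      simp only [bfsA_loop]
      rw [he1, he2, he3, he4]
      -- closure for the processed cell and membership transfers
      have hsub : ∀ y : Int × Int, y ∈ P ++ (r, c) :: tl →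
          y ∈ ((((P ++ (r, c) :: tl) ++ d1) ++ d2) ++ d3) ++ d4 := fun y hy =>
        List.mem_append_left _ (List.mem_append_left _ (List.mem_append_left _
          (List.mem_append_left _ hy)))
      have hsub1 : ∀ y : Int × Int, y ∈ (P ++ (r, c) :: tl) ++ d1 →
          y ∈ ((((P ++ (r, c) :: tl) ++ d1) ++ d2) ++ d3) ++ d4 := fun y hy =>
        List.mem_append_left _ (List.mem_append_left _ (List.mem_append_left _ hy))
      have hsub2 : ∀ y : Int × Int, y ∈ ((P ++ (r, c) :: tl) ++ d1) ++ d2 →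
          y ∈ ((((P ++ (r, c) :: tl) ++ d1) ++ d2) ++ d3) ++ d4 := fun y hy =>
        List.mem_append_left _ (List.mem_append_left _ hy)
      have hsub3 : ∀ y : Int × Int, y ∈ (((P ++ (r, c) :: tl) ++ d1) ++ d2) ++ d3 →
          y ∈ ((((P ++ (r, c) :: tl) ++ d1) ++ d2) ++ d3) ++ d4 := fun y hy =>
        List.mem_append_left _ hy
      have hsub4 : ∀ y : Int × Int, y ∈ (((P ++ (r, c) :: tl) ++ d1) ++ d2) ++ d3 ++ d4 →
          y ∈ ((((P ++ (r, c) :: tl) ++ d1) ++ d2) ++ d3) ++ d4 := fun y hy => hy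
      have hclp : ∀ x : Int × Int, E grid v1 rows cols (r, c) x →
          x ∈ ((((P ++ (r, c) :: tl) ++ d1) ++ d2) ++ d3) ++ d4 := by
        intro x hx
        obtain ⟨dd, hdd, rfl, hEd⟩ := hx
        simp only [dirTable, List.mem_cons, List.not_mem_nil, or_false] at hdd
        rcases hdd with rfl | rfl | rfl | rfl
        · rcases hc1 with ⟨-, himp⟩ | ⟨hde1, -, -⟩
          · exact hsub _ (himp hEd)
          · subst hde1
            exact hsub1 _ (by simp)
        · rcases hc2 with ⟨-, himp⟩ | ⟨hde2, -, -⟩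
          · exact hsub1 _ (himp hEd)
          · subst hde2
            exact hsub2 _ (by simp)
        · rcases hc3 with ⟨-, himp⟩ | ⟨hde3, -, -⟩
          · exact hsub2 _ (himp hEd)
          · subst hde3
            exact hsub3 _ (by simp)
        · rcases hc4 with ⟨-, himp⟩ | ⟨hde4, -, -⟩
          · exact hsub3 _ (himp hEd)
          · subst hde4
            exact hsub4 _ (by simp)
      -- repackage for the induction hypothesis with P' = P ++ [(r,c)]
      have hlistEq : ((((P ++ (r, c) :: tl) ++ d1) ++ d2) ++ d3) ++ d4
          = (P ++ [(r, c)]) ++ (((tl ++ d1) ++ d2) ++ d3 ++ d4) := by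
        simp [List.append_assoc]
      rw [hlistEq] at hinv4 hclp hsub
      apply ih (P ++ [(r, c)]) (((tl ++ d1) ++ d2) ++ d3 ++ d4) w4
      · exact hinv4
      · intro p hpP x hx
        rcases List.mem_append.mp hpP with h | h
        · refine hsub x (hcl p h x hx)
        · have hpe : p = (r, c) := by simpa using h
          subst hpe
          exact hclp x hx
      · exact hsub _ hstart
      · rw [ht]
        simp [List.any_append, List.any_cons, Bool.or_assoc]
      · have hcap : ((P ++ [(r, c)]) ++ (((tl ++ d1) ++ d2) ++ d3 ++ d4)).length
            ≤ capN sr sc rows cols :=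
          card_le_cap _ hinv4.2.2.2.1 (fun p hp => (hinv4.2.2.2.2 p hp).1)
        simp only [List.length_append, List.length_cons] at hcap hfuel ⊢
        omega


-- one tryN call, membership-wise
theorem mem_tryN (grid : List (List Int)) (v1 : List (List Bool))
    (region : List (Int × Int)) (w : Int) (new : List (Int × Int))
    (d : Bool × Int × Int × Int × Int) (x : Int × Int) :
    x ∈ tryN grid v1 region w new d ↔
      x ∈ new ∨ (x = (d.2.1, d.2.2.1) ∧ EdgeD grid v1 w d ∧ x ∉ region) := by
  obtain ⟨ok, nr, nc, wb, nb⟩ := d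
  unfold tryN
  simp only [EdgeD]
  split
  next hcond =>
    simp only [Bool.and_eq_true, Bool.not_eq_true', beq_iff_eq] at hcond
    obtain ⟨⟨⟨⟨⟨hok, hv⟩, h3⟩, h4⟩, hw⟩, hn⟩ := hcond
    simp only [List.mem_append, List.mem_singleton]
    constructor
    · rintro (h | rfl)
      · exact Or.inl h
      · exact Or.inr ⟨rfl, ⟨hok, hv, hw, hn⟩, by simpa using h3⟩
    · rintro (h | ⟨rfl, -, -⟩)
      · exact Or.inl h
      · exact Or.inr rfl
  next hcond =>
    constructor
    · exact Or.inl
    · rintro (h | ⟨rfl, ⟨hok, hv, hw, hn⟩, hreg⟩)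
      · exact h
      · by_cases hxn : (nr, nc) ∈ new
        · exact hxn
        · exfalso
          apply hcond
          simp only [Bool.and_eq_true, Bool.not_eq_true', beq_iff_eq]
          exact ⟨⟨⟨⟨⟨hok, hv⟩, by simpa using hreg⟩, by simpa using hxn⟩, hw⟩, hn⟩

-- membership in B's inner fold
theorem mem_foldl_tryN (grid : List (List Int)) (v1 : List (List Bool))
    (region : List (Int × Int)) (w : Int) :
    ∀ (ds : List (Bool × Int × Int × Int × Int)) (new : List (Int × Int)) (x : Int × Int),
    (x ∈ ds.foldl (tryN grid v1 region w) new ↔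
      x ∈ new ∨ ∃ d ∈ ds, x = (d.2.1, d.2.2.1) ∧ EdgeD grid v1 w d ∧ x ∉ region) := by
  intro ds
  induction ds with
  | nil => intro new x; simp
  | cons d ds ih =>
    intro new x
    rw [List.foldl_cons, ih, mem_tryN]
    simp only [List.mem_cons]
    constructor
    · rintro ((h | h) | ⟨d', hd', h⟩)
      · exact Or.inl h
      · exact Or.inr ⟨d, Or.inl rfl, h⟩
      · exact Or.inr ⟨d', Or.inr hd', h⟩
    · rintro (h | ⟨d', (rfl | hd'), h⟩)
      · exact Or.inl (Or.inl h)
      · exact Or.inl (Or.inr h)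
      · exact Or.inr ⟨d', hd', h⟩

theorem nodup_foldl_tryN (grid : List (List Int)) (v1 : List (List Bool))
    (region : List (Int × Int)) (w : Int) :
    ∀ (ds : List (Bool × Int × Int × Int × Int)) (new : List (Int × Int)),
    (region ++ new).Nodup → (region ++ ds.foldl (tryN grid v1 region w) new).Nodup := by
  intro ds
  induction ds with
  | nil => intro new h; simpa using h
  | cons d ds ih =>
    intro new h
    rw [List.foldl_cons]
    apply ih
    obtain ⟨ok, nr, nc, wb, nb⟩ := d
    unfold tryN
    dsimp only
    split
    next hcond =>
      simp only [Bool.and_eq_true, Bool.not_eq_true', beq_iff_eq] at hcond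
      obtain ⟨⟨⟨⟨⟨hok, hv⟩, h3⟩, h4⟩, hw⟩, hn⟩ := hcond
      rw [← List.append_assoc, List.nodup_append]
      refine ⟨h, by simp, ?_⟩
      intro y hy b hb heq
      have hb' : b = (nr, nc) := by simpa using hb
      subst hb'
      subst heq
      rcases List.mem_append.mp hy with hr | hn2
      · exact (by simpa using h3 : (nr, nc) ∉ region) hr
      · exact (by simpa using h4 : (nr, nc) ∉ new) hn2
    next => exact h

-- membership/nodup through the outer fold over the region
theorem mem_foldl_rows (grid : List (List Int)) (v1 : List (List Bool)) (rows cols : Int)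
    (region : List (Int × Int)) :
    ∀ (ps : List (Int × Int)) (new : List (Int × Int)) (x : Int × Int),
    (x ∈ ps.foldl
        (fun new p => (dirTable rows cols p.1 p.2).foldl (tryN grid v1 region (g2 grid p.1 p.2)) new)
        new ↔
      x ∈ new ∨ ∃ p ∈ ps, E grid v1 rows cols p x ∧ x ∉ region) := by
  intro ps
  induction ps with
  | nil => intro new x; simp
  | cons p ps ih =>
    intro new x
    rw [List.foldl_cons, ih, mem_foldl_tryN]
    simp only [List.mem_cons, E]
    constructor
    · rintro ((h | ⟨d, hd, rfl, he, hreg⟩) | ⟨p', hp', h⟩)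
      · exact Or.inl h
      · exact Or.inr ⟨p, Or.inl rfl, ⟨d, hd, rfl, he⟩, hreg⟩
      · exact Or.inr ⟨p', Or.inr hp', h⟩
    · rintro (h | ⟨p', (rfl | hp'), ⟨d, hd, rfl, he⟩, hreg⟩)
      · exact Or.inl (Or.inl h)
      · exact Or.inl (Or.inr ⟨d, hd, rfl, he, hreg⟩)
      · exact Or.inr ⟨p', hp', ⟨d, hd, rfl, he⟩, hreg⟩

theorem nodup_foldl_rows (grid : List (List Int)) (v1 : List (List Bool)) (rows cols : Int)
    (region : List (Int × Int)) :
    ∀ (ps : List (Int × Int)) (new : List (Int × Int)),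
    (region ++ new).Nodup →
    (region ++ ps.foldl
        (fun new p => (dirTable rows cols p.1 p.2).foldl (tryN grid v1 region (g2 grid p.1 p.2)) new)
        new).Nodup := by
  intro ps
  induction ps with
  | nil => intro new h; exact h
  | cons p ps ih =>
    intro new h
    rw [List.foldl_cons]
    exact ih _ (nodup_foldl_tryN grid v1 region (g2 grid p.1 p.2) _ new h)

-- membership in one sweep: exactly the fresh E-successors of the region
theorem mem_sweepB (grid : List (List Int)) (v1 : List (List Bool)) (rows cols : Int)
    (region : List (Int × Int)) (x : Int × Int) :
    x ∈ sweepB grid v1 rows cols region ↔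
      (∃ p ∈ region, E grid v1 rows cols p x) ∧ x ∉ region := by
  unfold sweepB
  rw [mem_foldl_rows]
  constructor
  · rintro (h | ⟨p, hp, he, hr⟩)
    · exact absurd h (by simp)
    · exact ⟨⟨p, hp, he⟩, hr⟩
  · rintro ⟨⟨p, hp, he⟩, hr⟩
    exact Or.inr ⟨p, hp, he, hr⟩

theorem nodup_sweepB (grid : List (List Int)) (v1 : List (List Bool)) (rows cols : Int)
    (region : List (Int × Int)) (h : region.Nodup) :
    (region ++ sweepB grid v1 rows cols region).Nodup := by
  unfold sweepB
  apply nodup_foldl_rows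
  simpa using h

-- B's loop computes the same predicate
theorem B_char (grid : List (List Int)) (v1 : List (List Bool)) (sr sc rows cols : Int) :
    ∀ (fuel : Nat) (region : List (Int × Int)),
    region.Nodup →
    (∀ p ∈ region, InRect sr sc rows cols p ∧ Reach grid v1 rows cols sr sc p) →
    (sr, sc) ∈ region →
    (capN sr sc rows cols - region.length) + 1 ≤ fuel →
    ((bfsB_loop grid v1 rows cols fuel region).any (regionCheck grid rows cols) = true ↔
      ∃ x, Reach grid v1 rows cols sr sc x ∧ regionCheck grid rows cols x = true) := by
  intro fuel
  induction fuel with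
  | zero => intro region hnd hmem hstart hfuel; omega
  | succ fuel ih =>
    intro region hnd hmem hstart hfuel
    have hstep : bfsB_loop grid v1 rows cols (fuel + 1) region =
        if (sweepB grid v1 rows cols region).isEmpty then region
        else bfsB_loop grid v1 rows cols fuel (region ++ sweepB grid v1 rows cols region) := rfl
    rw [hstep]
    by_cases hnew : (sweepB grid v1 rows cols region).isEmpty = true
    · rw [if_pos hnew]
      have hempty : sweepB grid v1 rows cols region = [] := List.isEmpty_iff.mp hnew
      constructor
      · intro h
        obtain ⟨x, hx, hc⟩ := List.any_eq_true.mp h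
        exact ⟨x, (hmem x hx).2, hc⟩
      · rintro ⟨x, hr, hc⟩
        apply List.any_eq_true.mpr
        refine ⟨x, ?_, hc⟩
        refine reach_subset region hstart ?_ x hr
        intro p hp y hy
        by_contra hyr
        have hmem2 : y ∈ sweepB grid v1 rows cols region :=
          (mem_sweepB grid v1 rows cols region y).mpr ⟨⟨p, hp, hy⟩, hyr⟩
        rw [hempty] at hmem2
        simp at hmem2
    · rw [if_neg hnew]
      have hnil : sweepB grid v1 rows cols region ≠ [] := fun hh => hnew (by simp [hh])
      have hnd' : (region ++ sweepB grid v1 rows cols region).Nodup := nodup_sweepB _ _ _ _ _ hnd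
      have hmem' : ∀ p ∈ region ++ sweepB grid v1 rows cols region,
          InRect sr sc rows cols p ∧ Reach grid v1 rows cols sr sc p := by
        intro p hp
        rcases List.mem_append.mp hp with h | h
        · exact hmem p h
        · obtain ⟨⟨p', hp', he⟩, -⟩ := (mem_sweepB grid v1 rows cols region p).mp h
          obtain ⟨hin', hre'⟩ := hmem p' hp'
          exact ⟨e_inRect he hin', hre'.tail he⟩
      have hcap : (region ++ sweepB grid v1 rows cols region).length ≤ capN sr sc rows cols :=
        card_le_cap _ hnd' (fun p hp => (hmem' p hp).1)
      have hlen : 1 ≤ (sweepB grid v1 rows cols region).length := List.length_pos_iff.mpr hnil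
      apply ih (region ++ sweepB grid v1 rows cols region) hnd' hmem'
        (List.mem_append_left _ hstart)
      simp only [List.length_append] at hcap ⊢
      omega

-- the rectangle precondition gives canonical indexability of every rectangle cell
theorem rect_cellOK_vis (grid : List (List Int)) (visited : List (List Bool)) (sr sc rows cols : Int)
    (h : preRect grid visited sr sc rows cols = true) :
    ∀ p, InRect sr sc rows cols p → cellOK visited p := by
  simp only [preRect, decide_eq_true_eq] at h
  obtain ⟨hsr, hsc, hg, hv, hrow⟩ := h
  intro p hp
  obtain ⟨h0, h1, h2, h3⟩ := hp
  have hpl : p.1 < (visited.length : Int) := lt_of_le_of_lt h1 hv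
  have hnat : p.1.toNat < grid.length := by omega
  obtain ⟨hgl, hvl⟩ := hrow p.1.toNat hnat (by omega)
  refine ⟨h0, hpl, h2, ?_⟩
  have hgd : PySem.List.pyGetD visited p.1 [] = visited.getD p.1.toNat [] := by
    rw [PySem.List.pyGetD_eq_getElem _ _ h0 (by simpa using hpl),
      List.getD_eq_getElem _ _ (by omega)]
  rw [hgd]
  exact lt_of_le_of_lt h3 hvl

theorem rect_cellOK (grid : List (List Int)) (visited : List (List Bool)) (sr sc rows cols : Int)
    (h : preRect grid visited sr sc rows cols = true) :
    ∀ p, InRect sr sc rows cols p → cellOK (vmark visited sr sc) p := by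
  have hsr : 0 ≤ sr := by
    simp only [preRect, decide_eq_true_eq] at h
    exact h.1
  intro p hp
  exact cellOK_transfer (by simp [vmark_length])
    (fun i hi0 hiv => vmark_rowlen visited sr sc i hsr hi0) (rect_cellOK_vis grid visited sr sc rows cols h p hp)

-- blocked direction: tryA is the identity on a first-iteration state
theorem tryA_blocked (grid : List (List Int)) (v1 : List (List Bool)) (rows cols : Int)
    (ok : Bool) (w nr nc wb nb : Int)
    (h : blockedB grid v1 ok w nr nc wb nb = true)
    (ql : List (Int × Int)) (t : Bool) :
    tryA grid rows cols ok w wb nb nr nc (v1, ql, t) = (v1, ql, t) := by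
  unfold tryA
  split
  next hc =>
    split
    next hcond =>
      exfalso
      simp only [Bool.and_eq_true, Bool.not_eq_true'] at hc
      obtain ⟨hok, hv⟩ := hc
      simp only [Bool.and_eq_true, beq_iff_eq] at hcond
      obtain ⟨hw, hn⟩ := hcond
      simp [blockedB, hok, hv, hw, hn] at h
    next => rfl
  next => rfl

theorem tryN_blocked (grid : List (List Int)) (v1 : List (List Bool))
    (region new : List (Int × Int)) (ok : Bool) (w nr nc wb nb : Int)
    (h : blockedB grid v1 ok w nr nc wb nb = true) :
    tryN grid v1 region w new (ok, nr, nc, wb, nb) = new := by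
  unfold tryN
  dsimp only
  split
  next hcond =>
    exfalso
    simp only [Bool.and_eq_true, Bool.not_eq_true', beq_iff_eq] at hcond
    obtain ⟨⟨⟨⟨⟨hok, hv⟩, h3⟩, h4⟩, hw⟩, hn⟩ := hcond
    simp [blockedB, hok, hv, hw, hn] at h
  next => rfl

-- ===== VERDICT (by name: the statement is the Claim_ definition above) =====
theorem bfs_region_spec : Claim_equal_bfs_region := by
  intro grid visited sr sc rows cols hdom hpre
  unfold Spec_bfs_region
  unfold Pre_bfs_region at hpre
  rw [Bool.or_eq_true] at hpre
  rcases hpre with hrect | hstuck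
  · -- rectangle case: both loops compute the reachability predicate
    have hpr := hrect
    simp only [preRect, decide_eq_true_eq] at hpr
    obtain ⟨hsr, hsc, hg, hv, hrowb⟩ := hpr
    have hrOK := rect_cellOK grid visited sr sc rows cols hrect
    have hstartIn : InRect sr sc rows cols (sr, sc) :=
      ⟨hsr, le_max_left _ _, hsc, le_max_left _ _⟩
    have hcellv : cellOK visited (sr, sc) := rect_cellOK_vis grid visited sr sc rows cols hrect _ hstartIn
    have hv2start : v2 (vmark visited sr sc) sr sc = true := by
      rw [v2_vmark visited sr sc sr sc hcellv hcellv, if_pos ⟨rfl, rfl⟩]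
    have hinv0 : InvA grid (vmark visited sr sc) sr sc rows cols ([] ++ [(sr, sc)])
        (vmark visited sr sc) := by
      refine ⟨?_, rfl, fun i h1 h2 => rfl, by simp, ?_⟩
      · intro p hcp
        by_cases hps : p = (sr, sc)
        · subst hps
          rw [hv2start]
          simp
        · simp [hps]
      · intro p hp
        have hpe : p = (sr, sc) := by simpa using hp
        subst hpe
        exact ⟨hstartIn, Relation.ReflTransGen.refl⟩
    have hA := A_char grid (vmark visited sr sc) sr sc rows cols hrOK
      (capN sr sc rows cols + 2) [] [(sr, sc)] (vmark visited sr sc)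
      (is_open_to_outside (g2 grid sr sc) sr sc rows cols)
      hinv0 (by simp) (by simp) (by simp [regionCheck])
      (by simp only [List.length_cons, List.length_nil, List.nil_append]; omega)
    have hB := B_char grid (vmark visited sr sc) sr sc rows cols
      (capN sr sc rows cols + 2) [(sr, sc)] (by simp)
      (by
        intro p hp
        have hpe : p = (sr, sc) := by simpa using hp
        subst hpe
        exact ⟨hstartIn, Relation.ReflTransGen.refl⟩)
      (by simp)
      (by simp only [List.length_cons]; omega)
    exact Bool.eq_iff_iff.mpr (hA.trans hB.symm)
  · -- stuck case: both loops stop after the first sweep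
    simp only [preStuck, Bool.and_eq_true] at hstuck
    obtain ⟨⟨⟨⟨-, -⟩, -⟩, -⟩, ⟨⟨⟨hb1, hb2⟩, hb3⟩, hb4⟩⟩ := hstuck
    have hAeq : bfs_region grid visited sr sc rows cols =
        is_open_to_outside (g2 grid sr sc) sr sc rows cols := by
      show bfsA_loop grid rows cols (capN sr sc rows cols + 2) [(sr, sc)] (vmark visited sr sc)
        (is_open_to_outside (g2 grid sr sc) sr sc rows cols) = _
      have h2 : capN sr sc rows cols + 2 = (capN sr sc rows cols + 1) + 1 := rfl
      rw [h2]
      simp only [bfsA_loop]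
      rw [tryA_blocked _ _ _ _ _ _ _ _ _ _ hb1, tryA_blocked _ _ _ _ _ _ _ _ _ _ hb2,
        tryA_blocked _ _ _ _ _ _ _ _ _ _ hb3, tryA_blocked _ _ _ _ _ _ _ _ _ _ hb4]
      simp only [bfsA_loop]
    have hsw : sweepB grid (vmark visited sr sc) rows cols [(sr, sc)] = [] := by
      unfold sweepB
      simp only [List.foldl_cons, List.foldl_nil, dirTable]
      rw [tryN_blocked _ _ _ _ _ _ _ _ _ _ hb1, tryN_blocked _ _ _ _ _ _ _ _ _ _ hb2,
        tryN_blocked _ _ _ _ _ _ _ _ _ _ hb3, tryN_blocked _ _ _ _ _ _ _ _ _ _ hb4]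
    have hBeq : bfs_region_alt grid visited sr sc rows cols =
        is_open_to_outside (g2 grid sr sc) sr sc rows cols := by
      show (bfsB_loop grid (vmark visited sr sc) rows cols (capN sr sc rows cols + 2)
        [(sr, sc)]).any (regionCheck grid rows cols) = _
      have hloop : bfsB_loop grid (vmark visited sr sc) rows cols (capN sr sc rows cols + 2)
          [(sr, sc)] = [(sr, sc)] := by
        have hstep : bfsB_loop grid (vmark visited sr sc) rows cols (capN sr sc rows cols + 2)
            [(sr, sc)] =
            if (sweepB grid (vmark visited sr sc) rows cols [(sr, sc)]).isEmpty then [(sr, sc)]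
            else bfsB_loop grid (vmark visited sr sc) rows cols (capN sr sc rows cols + 1)
              ([(sr, sc)] ++ sweepB grid (vmark visited sr sc) rows cols [(sr, sc)]) := rfl
        rw [hstep, hsw]
        simp
      rw [hloop]
      simp [regionCheck]
    rw [hAeq, hBeq]
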